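-- pv_equiv track=rewrite | github.com/trigtbh/lahacks-26 | backend/executor.py | workflow_failure_message
-- ===== SOURCE A (Python) =====
-- from typing import Any
--
-- def workflow_failure_message(result: dict[str, Any]) -> str:
--     failed_steps = result.get("steps_failed", [])
--     if not failed_steps:
--         return "workflow executed"
--
--     failed_errors = [str(step.get("error", "")) for step in failed_steps]
--     if any("Google account not connected" in error or "No Google OAuth token" in error for error in failed_errors):
--         return "google account not connected"
--     if any("Slack account not connected" in error or "No Slack OAuth token" in error for error in failed_errors):
--         return "slack account not connected"
--
--     failed_labels = [str(step.get("step", "")) for step in failed_steps]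
--     if any(label.startswith("gmail.") for label in failed_labels):
--         return "gmail action failed"
--     if any(label.startswith("google_calendar.") for label in failed_labels):
--         return "calendar action failed"
--     if any(label.startswith("slack.") for label in failed_labels):
--         return "slack action failed"
--     return "workflow failed"
-- ===== SOURCE B (Python) =====
-- def workflow_failure_message(result):
--     failed_steps = result.get("steps_failed", [])
--     if not failed_steps:
--         return "workflow executed"
--     google = slack = gmail = calendar = slack_step = False
--     for step in failed_steps:
--         error = str(step.get("error", ""))
--         label = str(step.get("step", ""))
--         google = google or "Google account not connected" in error or "No Google OAuth token" in error
--         slack = slack or "Slack account not connected" in error or "No Slack OAuth token" in error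
--         gmail = gmail or label.startswith("gmail.")
--         calendar = calendar or label.startswith("google_calendar.")
--         slack_step = slack_step or label.startswith("slack.")
--     if google:
--         return "google account not connected"
--     if slack:
--         return "slack account not connected"
--     if gmail:
--         return "gmail action failed"
--     if calendar:
--         return "calendar action failed"
--     if slack_step:
--         return "slack action failed"
--     return "workflow failed"
-- ===== Notes on version B (the rewrite author's own statement) =====
-- stated objective: simpler
-- what changed: Replaces the two intermediate list comprehensions and five separate any() scans with a single pass over failed_steps that accumulates five boolean flags, then returns by checking the flags in the original priority order.
import Mathlib
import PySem

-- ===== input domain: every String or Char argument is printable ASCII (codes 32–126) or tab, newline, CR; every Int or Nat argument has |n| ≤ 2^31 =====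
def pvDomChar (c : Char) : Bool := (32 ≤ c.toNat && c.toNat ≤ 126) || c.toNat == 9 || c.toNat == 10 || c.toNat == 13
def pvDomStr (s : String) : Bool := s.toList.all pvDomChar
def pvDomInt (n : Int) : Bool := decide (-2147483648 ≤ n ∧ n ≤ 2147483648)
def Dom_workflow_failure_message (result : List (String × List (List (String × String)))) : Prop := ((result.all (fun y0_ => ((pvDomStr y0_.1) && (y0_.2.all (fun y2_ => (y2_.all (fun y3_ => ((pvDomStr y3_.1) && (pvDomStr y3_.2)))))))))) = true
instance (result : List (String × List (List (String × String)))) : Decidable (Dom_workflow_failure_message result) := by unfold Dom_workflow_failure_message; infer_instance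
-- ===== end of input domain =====

-- B replaces the intermediate comprehensions and repeated any() scans with one
-- flag-accumulating pass over failed_steps (objective: simpler).

-- ===== PORT A =====
def workflow_failure_message (result : List (String × List (List (String × String)))) : String :=
  let failed_steps := (PySem.Dict.mk result).getD "steps_failed" []
  if failed_steps.isEmpty then "workflow executed"
  else
    let failed_errors := failed_steps.map (fun step => (PySem.Dict.mk step).getD "error" "")
    if failed_errors.any (fun error => PySem.Str.isIn "Google account not connected" error || PySem.Str.isIn "No Google OAuth token" error) then
      "google account not connected"
    else if failed_errors.any (fun error => PySem.Str.isIn "Slack account not connected" error || PySem.Str.isIn "No Slack OAuth token" error) then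
      "slack account not connected"
    else
      let failed_labels := failed_steps.map (fun step => (PySem.Dict.mk step).getD "step" "")
      if failed_labels.any (fun label => PySem.Str.startswith label "gmail.") then
        "gmail action failed"
      else if failed_labels.any (fun label => PySem.Str.startswith label "google_calendar.") then
        "calendar action failed"
      else if failed_labels.any (fun label => PySem.Str.startswith label "slack.") then
        "slack action failed"
      else "workflow failed"

-- ===== PORT B =====
-- one pass: the five flags accumulated over failed_steps
def pvFlagsStep (acc : Bool × Bool × Bool × Bool × Bool) (step : List (String × String)) :
    Bool × Bool × Bool × Bool × Bool :=
  let error := (PySem.Dict.mk step).getD "error" ""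
  let label := (PySem.Dict.mk step).getD "step" ""
  (acc.1 || PySem.Str.isIn "Google account not connected" error || PySem.Str.isIn "No Google OAuth token" error,
   acc.2.1 || PySem.Str.isIn "Slack account not connected" error || PySem.Str.isIn "No Slack OAuth token" error,
   acc.2.2.1 || PySem.Str.startswith label "gmail.",
   acc.2.2.2.1 || PySem.Str.startswith label "google_calendar.",
   acc.2.2.2.2 || PySem.Str.startswith label "slack.")

def workflow_failure_message_alt (result : List (String × List (List (String × String)))) : String :=
  let failed_steps := (PySem.Dict.mk result).getD "steps_failed" []
  if failed_steps.isEmpty then "workflow executed"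
  else
    let flags := failed_steps.foldl pvFlagsStep (false, false, false, false, false)
    if flags.1 then "google account not connected"
    else if flags.2.1 then "slack account not connected"
    else if flags.2.2.1 then "gmail action failed"
    else if flags.2.2.2.1 then "calendar action failed"
    else if flags.2.2.2.2 then "slack action failed"
    else "workflow failed"

-- ===== PRECONDITION & SPEC =====
def Spec_workflow_failure_message (result : List (String × List (List (String × String)))) (out : String) : Prop := out = workflow_failure_message_alt result
instance (result : List (String × List (List (String × String)))) (out : String) : Decidable (Spec_workflow_failure_message result out) := by unfold Spec_workflow_failure_message; infer_instance

-- ===== CLAIM (what is proved, stated in full; the proofs are below) =====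
def Claim_equal_workflow_failure_message : Prop := ∀ (result : List (String × List (List (String × String)))), Dom_workflow_failure_message result → Spec_workflow_failure_message result (workflow_failure_message result)

-- ===== LEMMAS AND PROOFS =====

-- the folded flags are exactly the five any-scans of A
theorem pvFlags_eq (xs : List (List (String × String))) (g s gm cal sl : Bool) :
    xs.foldl pvFlagsStep (g, s, gm, cal, sl) =
      (g || xs.any (fun step => PySem.Str.isIn "Google account not connected" ((PySem.Dict.mk step).getD "error" "") || PySem.Str.isIn "No Google OAuth token" ((PySem.Dict.mk step).getD "error" "")),
       s || xs.any (fun step => PySem.Str.isIn "Slack account not connected" ((PySem.Dict.mk step).getD "error" "") || PySem.Str.isIn "No Slack OAuth token" ((PySem.Dict.mk step).getD "error" "")),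
       gm || xs.any (fun step => PySem.Str.startswith ((PySem.Dict.mk step).getD "step" "") "gmail."),
       cal || xs.any (fun step => PySem.Str.startswith ((PySem.Dict.mk step).getD "step" "") "google_calendar."),
       sl || xs.any (fun step => PySem.Str.startswith ((PySem.Dict.mk step).getD "step" "") "slack.")) := by
  induction xs generalizing g s gm cal sl with
  | nil => simp
  | cons x xs ih =>
    simp only [List.foldl_cons, List.any_cons, pvFlagsStep, ih]
    simp [Bool.or_assoc]

-- ===== VERDICT (by name: the statement is the Claim_ definition above) =====
theorem workflow_failure_message_spec : Claim_equal_workflow_failure_message := by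
  intro result _
  unfold Spec_workflow_failure_message workflow_failure_message workflow_failure_message_alt
  simp only [pvFlags_eq, List.any_map, Bool.false_or]
  rfl
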